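-- pv_equiv track=rewrite | github.com/alphapebble/EvoKB | evokb/agents/librarian.py | parse_proposed_action
-- ===== SOURCE A (Python) =====
-- def parse_proposed_action(output: str) -> dict:
--     """Parse the LLM output to extract action details"""
--     result = {"action": None, "target": None, "content": None, "reasoning": None}
--
--     sections = ["REASONING:", "PROPOSED_ACTION:", "TARGET_FILE:", "NEW_CONTENT:"]
--     current_section = None
--
--     for line in output.split("\n"):
--         line = line.strip()
--         if line in sections:
--             current_section = line.lower().replace(":", "")
--             result[current_section] = ""
--         elif current_section and line:
--             result[current_section] += line + "\n"
--
--     for key in result: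
--         if result[key]:
--             result[key] = result[key].strip()
--
--     return result
-- ===== SOURCE B (Python) =====
-- # B: block-splitting decomposition — strip all lines once, then consume header-delimited
-- # blocks with a nested loop and join each block; no current-section state machine,
-- # no incremental string building, no final strip pass.
-- HEADERS = {"REASONING:": "reasoning", "PROPOSED_ACTION:": "proposed_action",
--            "TARGET_FILE:": "target_file", "NEW_CONTENT:": "new_content"}
--
-- def parse_proposed_action(output: str) -> dict:
--     result = {"action": None, "target": None, "content": None, "reasoning": None}
--     lines = [l.strip() for l in output.split("\n")]
--     while lines:
--         line, lines = lines[0], lines[1:]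
--         if line in HEADERS:
--             block = []
--             while lines and lines[0] not in HEADERS:
--                 if lines[0]:
--                     block.append(lines[0])
--                 lines = lines[1:]
--             result[HEADERS[line]] = "\n".join(block)
--     return result
-- ===== Notes on version B (the rewrite author's own statement) =====
-- stated objective: alternative
-- what changed: A is a single-pass state machine that tracks the current section, appends each line plus a newline to that section's growing buffer and needs a trailing per-key strip pass; B strips all lines once up front, then splits the line list into header-delimited blocks with a nested consuming loop and joins each block with newlines directly, so it keeps no section state, builds no incremental buffers and needs no final strip pass.
import Mathlib
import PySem

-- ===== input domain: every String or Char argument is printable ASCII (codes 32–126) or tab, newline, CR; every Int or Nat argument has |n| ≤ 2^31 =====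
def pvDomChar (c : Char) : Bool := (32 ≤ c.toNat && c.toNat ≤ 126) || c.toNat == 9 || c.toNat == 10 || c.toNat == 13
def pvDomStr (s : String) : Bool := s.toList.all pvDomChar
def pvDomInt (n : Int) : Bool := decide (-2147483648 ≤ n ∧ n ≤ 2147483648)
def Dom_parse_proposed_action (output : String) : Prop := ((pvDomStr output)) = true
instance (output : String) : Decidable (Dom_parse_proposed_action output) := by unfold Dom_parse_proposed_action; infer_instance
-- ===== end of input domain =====

-- B replaces A's current-section state machine (incremental "+= line+'\n'" buffers plus a
-- trailing per-key strip pass) by a block splitter: strip all lines once, consume each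
-- header-delimited block with a nested loop and join it (objective: alternative).

-- ===== PORT A =====
-- A-side helpers: A's loop body over the same (result, current_section) state
def aSections : List String := ["REASONING:", "PROPOSED_ACTION:", "TARGET_FILE:", "NEW_CONTENT:"]

def aStep (st : PySem.Dict String (Option String) × Option String) (line0 : String) :
    PySem.Dict String (Option String) × Option String :=
  let line := PySem.Str.strip line0
  if aSections.contains line then
    let cur := PySem.Str.replace (PySem.Str.lower line) ":" ""
    (st.1.insert cur (some ""), some cur)
  else
    match st.2 with
    | some cur =>
        if cur ≠ "" ∧ line ≠ "" then
          (st.1.modify cur none (fun v => some (v.getD "" ++ line ++ "\n")), st.2)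
        else st
    | none => st

def parse_proposed_action (output : String) : List (String × Option String) :=
  let result0 : PySem.Dict String (Option String) :=
    ⟨[("action", none), ("target", none), ("content", none), ("reasoning", none)]⟩
  let st := (((PySem.Str.split? output "\n").getD []).foldl aStep (result0, none))
  st.1.items.map (fun p =>
    match p.2 with
    | some s => if s ≠ "" then (p.1, some (PySem.Str.strip s)) else (p.1, some s)
    | none => (p.1, none))

-- ===== PORT B =====
def bHeaders : PySem.Dict String String :=
  ⟨[("REASONING:", "reasoning"), ("PROPOSED_ACTION:", "proposed_action"),
    ("TARGET_FILE:", "target_file"), ("NEW_CONTENT:", "new_content")]⟩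

def goB (result : PySem.Dict String (Option String)) (lines : List String) :
    PySem.Dict String (Option String) :=
  match lines with
  | [] => result
  | line :: rest =>
    if bHeaders.contains line then
      let block := (rest.takeWhile (fun l => !bHeaders.contains l)).filter (fun l => l != "")
      goB (result.insert (bHeaders.getD line "") (some (PySem.Str.join "\n" block)))
          (rest.dropWhile (fun l => !bHeaders.contains l))
    else goB result rest
termination_by lines.length
decreasing_by
  · simpa using Nat.lt_succ_of_le (List.length_dropWhile_le _ _)
  · simp

def parse_proposed_action_alt (output : String) : List (String × Option String) :=
  let result0 : PySem.Dict String (Option String) :=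
    ⟨[("action", none), ("target", none), ("content", none), ("reasoning", none)]⟩
  let lines := ((PySem.Str.split? output "\n").getD []).map PySem.Str.strip
  (goB result0 lines).items

-- ===== PRECONDITION & SPEC =====
def Spec_parse_proposed_action (output : String) (out : List (String × Option String)) : Prop := out = parse_proposed_action_alt output
instance (output : String) (out : List (String × Option String)) : Decidable (Spec_parse_proposed_action output out) := by unfold Spec_parse_proposed_action; infer_instance

-- ===== CLAIM (what is proved, stated in full; the proofs are below) =====
def Claim_equal_parse_proposed_action : Prop := ∀ (output : String), Dom_parse_proposed_action output → Spec_parse_proposed_action output (parse_proposed_action output)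

-- ===== LEMMAS AND PROOFS =====

-- A's trailing per-key strip pass, value- and dict-level
def finV : Option String → Option String
  | some s => if s ≠ "" then some (PySem.Str.strip s) else some s
  | none => none

def fin (d : PySem.Dict String (Option String)) : PySem.Dict String (Option String) :=
  ⟨d.items.map (fun p => (p.1, finV p.2))⟩

-- the raw buffer A accumulates over one block: each nonempty line followed by "\n"
def flat : List String → String
  | [] => ""
  | l :: ls => if l != "" then l ++ "\n" ++ flat ls else flat ls

theorem fin_insert (d : PySem.Dict String (Option String)) (k : String) (v : Option String) :
    fin (d.insert k v) = (fin d).insert k (finV v) := by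
  unfold fin PySem.Dict.insert PySem.Dict.contains
  simp only [List.any_map]
  rcases d with ⟨items⟩
  by_cases h : (items.any fun p => p.1 == k) = true
  · simp only [h, if_true, List.map_map, Function.comp_def]
    congr 1
    simp only [List.map_inj_left]
    rintro ⟨a, b⟩ _
    by_cases ha : a = k <;> simp [ha]
  · simp [h, Function.comp_def]

theorem contains_eq (l : String) : aSections.contains l = bHeaders.contains l := by
  simp only [aSections, bHeaders, PySem.Dict.contains, List.contains, List.any_cons,
    List.any_nil, List.elem_cons, List.elem_nil]
  rw [BEq.comm (a := "REASONING:") (b := l), BEq.comm (a := "PROPOSED_ACTION:") (b := l),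
    BEq.comm (a := "TARGET_FILE:") (b := l), BEq.comm (a := "NEW_CONTENT:") (b := l)]
  cases l == "REASONING:" <;> cases l == "PROPOSED_ACTION:" <;> cases l == "TARGET_FILE:" <;>
    cases l == "NEW_CONTENT:" <;> rfl

theorem mem4 (l : String) (h : bHeaders.contains l = true) :
    l = "REASONING:" ∨ l = "PROPOSED_ACTION:" ∨ l = "TARGET_FILE:" ∨ l = "NEW_CONTENT:" := by
  simp only [bHeaders, PySem.Dict.contains, List.any_cons, List.any_nil, Bool.or_false,
    Bool.or_eq_true, beq_iff_eq] at h
  rcases h with h | h | h | h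
  · exact Or.inl h.symm
  · exact Or.inr (Or.inl h.symm)
  · exact Or.inr (Or.inr (Or.inl h.symm))
  · exact Or.inr (Or.inr (Or.inr h.symm))

theorem key_eq (l : String) (h : bHeaders.contains l = true) :
    PySem.Str.replace (PySem.Str.lower l) ":" "" = bHeaders.getD l "" := by
  rcases mem4 l h with h | h | h | h <;> subst h <;> decide

theorem key_ne (l : String) (h : bHeaders.contains l = true) : bHeaders.getD l "" ≠ "" := by
  rcases mem4 l h with h | h | h | h <;> subst h <;> decide

theorem lstrip_eq_self (l : List Char) (hne : l ≠ [])
    (hh : PySem.Chars.isspace (l.head hne) = false) : PySem.Chars.lstrip l = l := by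
  unfold PySem.Chars.lstrip
  cases l with
  | nil => simp at hne
  | cons a t => simp at hh; simp [hh]

theorem rstrip_eq_self (l : List Char) (hne : l ≠ [])
    (hl : PySem.Chars.isspace (l.getLast hne) = false) : PySem.Chars.rstrip l = l := by
  unfold PySem.Chars.rstrip
  have hr : l.reverse ≠ [] := by simpa using hne
  cases hrr : l.reverse with
  | nil => exact absurd hrr hr
  | cons a t =>
      have h2 : l.getLast? = some a := by rw [← List.head?_reverse, hrr]; rfl
      have h3 : l.getLast? = some (l.getLast hne) := List.getLast?_eq_some_getLast hne
      have ha : PySem.Chars.isspace a = false := by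
        rw [h2] at h3; injection h3 with h3; rw [h3]; exact hl
      rw [List.dropWhile_cons]
      rw [ha]
      simp only [Bool.false_eq_true, if_false]
      rw [← hrr, List.reverse_reverse]

theorem rstrip_append (a b : List Char) (h : PySem.Chars.rstrip b ≠ []) :
    PySem.Chars.rstrip (a ++ b) = a ++ PySem.Chars.rstrip b := by
  unfold PySem.Chars.rstrip at *
  rw [List.reverse_append, List.dropWhile_append]
  have hne : ¬ (List.dropWhile PySem.Chars.isspace b.reverse).isEmpty := by
    simpa [List.isEmpty_iff] using h
  simp [hne]

theorem rstrip_newline (l : List Char) (hne : l ≠ [])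
    (hl : PySem.Chars.isspace (l.getLast hne) = false) :
    PySem.Chars.rstrip (l ++ ['\n']) = l := by
  have hstep : PySem.Chars.rstrip (l ++ ['\n']) = PySem.Chars.rstrip l := by
    unfold PySem.Chars.rstrip
    rw [List.reverse_append]
    have : ['\n'].reverse = ['\n'] := rfl
    rw [this]
    rw [List.singleton_append, List.dropWhile_cons]
    norm_num [show PySem.Chars.isspace '\n' = true from by decide]
  rw [hstep]
  exact rstrip_eq_self l hne hl

theorem strip_getLast? (m : List Char) (c : Char)
    (h : (PySem.Chars.strip m).getLast? = some c) : PySem.Chars.isspace c = false := by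
  unfold PySem.Chars.strip PySem.Chars.rstrip at h
  rw [List.getLast?_reverse] at h
  rcases List.head?_eq_some_iff.mp h with ⟨t, ht⟩
  have hz : List.dropWhile PySem.Chars.isspace (PySem.Chars.lstrip m).reverse ≠ [] := by
    rw [ht]; simp
  have h1 := List.head?_eq_some_head hz
  rw [h] at h1
  have := List.head_dropWhile_not PySem.Chars.isspace hz
  rwa [← Option.some_inj.mp h1] at this

theorem strip_head? (m : List Char) (c : Char)
    (h : (PySem.Chars.strip m).head? = some c) : PySem.Chars.isspace c = false := by
  unfold PySem.Chars.strip PySem.Chars.rstrip at h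
  rw [List.head?_reverse] at h
  rcases List.dropWhile_suffix (l := (PySem.Chars.lstrip m).reverse) PySem.Chars.isspace with ⟨x, hx⟩
  have hW : ((PySem.Chars.lstrip m).reverse).getLast? = some c := by
    rw [← hx]; rwa [List.getLast?_append_of_ne_nil]
    intro h0; rw [h0] at h; simp at h
  rw [List.getLast?_reverse] at hW
  unfold PySem.Chars.lstrip at hW
  rcases List.head?_eq_some_iff.mp hW with ⟨t, ht⟩
  have hz2 : List.dropWhile PySem.Chars.isspace m ≠ [] := by rw [ht]; simp
  have h1 := List.head?_eq_some_head hz2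
  rw [hW] at h1
  have := List.head_dropWhile_not PySem.Chars.isspace hz2
  rwa [← Option.some_inj.mp h1] at this

def Nice (l : List Char) : Prop :=
  l ≠ [] ∧ (∀ c, l.head? = some c → PySem.Chars.isspace c = false) ∧
    (∀ c, l.getLast? = some c → PySem.Chars.isspace c = false)

theorem nice_getLast (l : List Char) (h : Nice l) :
    PySem.Chars.isspace (l.getLast h.1) = false :=
  h.2.2 _ (List.getLast?_eq_some_getLast h.1)

theorem inter_ne_nil (r : List Char) (rs : List (List Char)) (h : r ≠ []) :
    List.intercalate ['\n'] (r :: rs) ≠ [] := by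
  cases rs with
  | nil => simpa [List.intercalate, List.intersperse] using h
  | cons b t => simp [List.intercalate, List.intersperse, h]

theorem rstrip_flatten (blk : List (List Char)) (h : ∀ l ∈ blk, Nice l) :
    PySem.Chars.rstrip ((blk.map (· ++ ['\n'])).flatten) = List.intercalate ['\n'] blk := by
  induction blk with
  | nil => simp [List.intercalate]; decide
  | cons l rest ih =>
      have hl : Nice l := h l (by simp)
      cases rest with
      | nil =>
          simp only [List.map_cons, List.map_nil, List.flatten_cons, List.flatten_nil,
            List.append_nil]
          rw [rstrip_newline l hl.1 (nice_getLast l hl)]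
          simp [List.intercalate, List.intersperse]
      | cons r rs =>
          have hr : Nice r := h r (by simp)
          have ihr := ih (fun x hx => h x (by simp [hx]))
          simp only [List.map_cons, List.flatten_cons] at ihr ⊢
          rw [rstrip_append (l ++ ['\n']) ((r ++ ['\n']) ++ (List.map (fun x => x ++ ['\n']) rs).flatten) (by rw [ihr]; exact inter_ne_nil r rs hr.1)]
          rw [ihr]
          simp [List.intercalate, List.intersperse]

theorem strip_flatten (blk : List (List Char)) (hb : blk ≠ []) (h : ∀ l ∈ blk, Nice l) :
    PySem.Chars.strip ((blk.map (· ++ ['\n'])).flatten) = List.intercalate ['\n'] blk := by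
  unfold PySem.Chars.strip
  cases blk with
  | nil => exact absurd rfl hb
  | cons l rest =>
      have hl : Nice l := h l (by simp)
      have hfl : PySem.Chars.lstrip (((l :: rest).map (· ++ ['\n'])).flatten)
          = ((l :: rest).map (· ++ ['\n'])).flatten := by
        apply lstrip_eq_self _ (by simp)
        cases l with
        | nil => exact absurd rfl hl.1
        | cons c t =>
            have : PySem.Chars.isspace c = false := hl.2.1 c rfl
            simpa using this
      rw [hfl]
      exact rstrip_flatten _ h

theorem flat_toList (ts : List String) :
    (flat ts).toList
      = (((ts.filter (fun l => l != "")).map String.toList).map (· ++ ['\n'])).flatten := by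
  induction ts with
  | nil => simp [flat]
  | cons l t ih =>
      by_cases hl : l = ""
      · subst hl; simp [flat, ih]
      · have hb : (l != "") = true := by simpa using hl
        simp only [flat, hb, if_true, List.filter_cons, List.map_cons, List.flatten_cons]
        rw [String.toList_append, String.toList_append, ih]
        rfl

theorem nice_of_strip (l : String) (hl : l ≠ "") (m : String) (hm : l = PySem.Str.strip m) :
    Nice l.toList := by
  have hlist : l.toList = PySem.Chars.strip m.toList := by rw [hm]; simp
  refine ⟨?_, ?_, ?_⟩
  · intro h0; exact hl (String.toList_eq_nil_iff.mp h0)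
  · intro c hc; rw [hlist] at hc; exact strip_head? m.toList c hc
  · intro c hc; rw [hlist] at hc; exact strip_getLast? m.toList c hc

theorem strip_flat (ts : List String) (h : ∀ l ∈ ts, ∃ m, l = PySem.Str.strip m) :
    finV (some (flat ts)) = some (PySem.Str.join "\n" (ts.filter (fun l => l != ""))) := by
  have hjoin : (PySem.Str.join "\n" (ts.filter (fun l => l != ""))).toList
      = List.intercalate ['\n'] ((ts.filter (fun l => l != "")).map String.toList) := by
    rw [PySem.Str.toList_join]; rfl
  by_cases hf : ts.filter (fun l => l != "") = []
  · have hempty : flat ts = "" := by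
      apply String.toList_eq_nil_iff.mp
      rw [flat_toList, hf]; rfl
    rw [hempty]
    have : PySem.Str.join "\n" (ts.filter (fun l => l != "")) = "" := by
      apply String.toList_eq_nil_iff.mp
      rw [hjoin, hf]; rfl
    rw [this]; rfl
  · have hnice : ∀ lc ∈ (ts.filter (fun l => l != "")).map String.toList, Nice lc := by
      intro lc hlc
      rcases List.mem_map.mp hlc with ⟨l, hlmem, rfl⟩
      have hlt : l ∈ ts := List.mem_of_mem_filter hlmem
      have hlne : l ≠ "" := by simpa using List.of_mem_filter hlmem
      rcases h l hlt with ⟨m, hm⟩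
      exact nice_of_strip l hlne m hm
    have hblk : (ts.filter (fun l => l != "")).map String.toList ≠ [] := by
      simpa using hf
    have hstrip : (PySem.Str.strip (flat ts)).toList
        = List.intercalate ['\n'] ((ts.filter (fun l => l != "")).map String.toList) := by
      rw [PySem.Str.toList_strip, flat_toList]
      exact strip_flatten _ hblk hnice
    have hne : flat ts ≠ "" := by
      intro h0
      apply hf
      have := flat_toList ts
      rw [h0] at this
      rcases hts : ts.filter (fun l => l != "") with _ | ⟨a, b⟩
      · rfl
      · exfalso
        rw [hts] at this
        simp only [List.map_cons, List.flatten_cons] at this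
        have ha : a ≠ "" := by
          have := List.of_mem_filter (by rw [hts]; exact List.mem_cons_self ..)
          simpa using this
        simp at this
    show (if flat ts ≠ "" then some (PySem.Str.strip (flat ts)) else some (flat ts))
        = some (PySem.Str.join "\n" (ts.filter (fun l => l != "")))
    rw [if_pos hne]
    congr 1
    apply String.toList_inj.mp
    rw [hstrip, hjoin]

theorem takeWhile_strips (raw : List String) :
    ∀ l ∈ (raw.map PySem.Str.strip).takeWhile (fun l => !bHeaders.contains l),
      ∃ m, l = PySem.Str.strip m := by
  intro l hl
  rcases List.mem_map.mp ((List.takeWhile_sublist _).subset hl) with ⟨m, _, rfl⟩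
  exact ⟨m, rfl⟩

theorem lemA2 (raw : List String) (d : PySem.Dict String (Option String)) (k buf : String)
    (hk : k ≠ "") :
    fin ((raw.foldl aStep (d.insert k (some buf), some k)).1)
      = goB (fin (d.insert k (some (buf ++
          flat ((raw.map PySem.Str.strip).takeWhile (fun l => !bHeaders.contains l))))))
          ((raw.map PySem.Str.strip).dropWhile (fun l => !bHeaders.contains l)) := by
  induction raw generalizing d k buf with
  | nil => simp [goB, flat, String.append_empty]
  | cons l raw' ih =>
      simp only [List.foldl_cons, List.map_cons]
      by_cases hc : bHeaders.contains (PySem.Str.strip l) = true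
      · have hca : aSections.contains (PySem.Str.strip l) = true := by
          rw [contains_eq]; exact hc
        have hstep : aStep (d.insert k (some buf), some k) l
            = ((d.insert k (some buf)).insert
                (PySem.Str.replace (PySem.Str.lower (PySem.Str.strip l)) ":" "")
                (some ""), some (PySem.Str.replace (PySem.Str.lower (PySem.Str.strip l)) ":" "")) := by
          simp only [aStep, hca, if_true]
        rw [hstep, key_eq _ hc]
        rw [ih (d.insert k (some buf)) (bHeaders.getD (PySem.Str.strip l) "") "" (key_ne _ hc)]
        rw [List.takeWhile_cons_of_neg (by simp [hc]), List.dropWhile_cons_of_neg (by simp [hc])]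
        rw [show flat ([] : List String) = "" from rfl, String.append_empty, String.empty_append]
        conv_rhs => rw [goB]
        simp only [hc, if_true]
        rw [fin_insert]
        rw [strip_flat _ (takeWhile_strips raw')]
      · have hcb : bHeaders.contains (PySem.Str.strip l) = false := by simpa using hc
        have hca : aSections.contains (PySem.Str.strip l) = false := by
          rw [contains_eq]; exact hcb
        rw [List.takeWhile_cons_of_pos (by simp [hcb]), List.dropWhile_cons_of_pos (by simp [hcb])]
        by_cases hl : PySem.Str.strip l = ""
        · have hstep : aStep (d.insert k (some buf), some k) l = (d.insert k (some buf), some k) := by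
            simp only [aStep, hca, Bool.false_eq_true, if_false]
            simp [hl]
          rw [hstep, ih d k buf hk]
          have hflat : flat (PySem.Str.strip l ::
              ((raw'.map PySem.Str.strip).takeWhile (fun l => !bHeaders.contains l)))
              = flat ((raw'.map PySem.Str.strip).takeWhile (fun l => !bHeaders.contains l)) := by
            simp [flat, hl]
          rw [hflat]
        · have hstep : aStep (d.insert k (some buf), some k) l
              = (d.insert k (some (buf ++ PySem.Str.strip l ++ "\n")), some k) := by
            simp only [aStep, hca, Bool.false_eq_true, if_false]
            rw [if_pos ⟨hk, hl⟩]
            simp [PySem.Dict.modify, PySem.Dict.getD_insert_self, PySem.Dict.insert_insert_self]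
          rw [hstep, ih d k (buf ++ PySem.Str.strip l ++ "\n") hk]
          have hflat : flat (PySem.Str.strip l ::
              ((raw'.map PySem.Str.strip).takeWhile (fun l => !bHeaders.contains l)))
              = PySem.Str.strip l ++ "\n" ++
                flat ((raw'.map PySem.Str.strip).takeWhile (fun l => !bHeaders.contains l)) := by
            simp [flat, hl]
          rw [hflat]
          rw [show buf ++ PySem.Str.strip l ++ "\n" ++
                flat ((raw'.map PySem.Str.strip).takeWhile (fun l => !bHeaders.contains l))
              = buf ++ (PySem.Str.strip l ++ "\n" ++
                flat ((raw'.map PySem.Str.strip).takeWhile (fun l => !bHeaders.contains l))) from by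
            simp [String.append_assoc]]

theorem lemA (raw : List String) (d : PySem.Dict String (Option String)) :
    fin ((raw.foldl aStep (d, none)).1) = goB (fin d) (raw.map PySem.Str.strip) := by
  induction raw generalizing d with
  | nil => simp [goB]
  | cons l raw' ih =>
      simp only [List.foldl_cons, List.map_cons]
      by_cases hc : bHeaders.contains (PySem.Str.strip l) = true
      · have hca : aSections.contains (PySem.Str.strip l) = true := by
          rw [contains_eq]; exact hc
        have hstep : aStep (d, none) l
            = (d.insert (PySem.Str.replace (PySem.Str.lower (PySem.Str.strip l)) ":" "")
                (some ""), some (PySem.Str.replace (PySem.Str.lower (PySem.Str.strip l)) ":" "")) := by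
          simp only [aStep, hca, if_true]
        rw [hstep, key_eq _ hc]
        rw [lemA2 raw' d (bHeaders.getD (PySem.Str.strip l) "") "" (key_ne _ hc)]
        conv_rhs => rw [goB]
        simp only [hc, if_true]
        rw [String.empty_append, fin_insert]
        rw [strip_flat _ (takeWhile_strips raw')]
      · have hca : aSections.contains (PySem.Str.strip l) = false := by
          rw [contains_eq]; simpa using hc
        have hstep : aStep (d, none) l = (d, none) := by
          simp only [aStep, hca, Bool.false_eq_true, if_false]
        rw [hstep, ih d]
        conv_rhs => rw [goB]
        simp only [hc, Bool.false_eq_true, if_false]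

-- ===== VERDICT (by name: the statement is the Claim_ definition above) =====
theorem parse_proposed_action_spec : Claim_equal_parse_proposed_action := by
  unfold Claim_equal_parse_proposed_action
  intro output _
  unfold Spec_parse_proposed_action parse_proposed_action parse_proposed_action_alt
  dsimp only
  have hmap : (((PySem.Str.split? output "\n").getD []).foldl aStep
      (⟨[("action", none), ("target", none), ("content", none), ("reasoning", none)]⟩, none)).1.items.map
        (fun p => match p.2 with
          | some s => if s ≠ "" then (p.1, some (PySem.Str.strip s)) else (p.1, some s)
          | none => (p.1, none))
      = (fin (((PySem.Str.split? output "\n").getD []).foldl aStep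
          (⟨[("action", none), ("target", none), ("content", none), ("reasoning", none)]⟩, none)).1).items := by
    show _ = List.map _ _
    apply List.map_congr_left
    rintro ⟨a, b⟩ _
    cases b with
    | none => rfl
    | some s => by_cases hs : s = "" <;> simp [finV, hs]
  rw [hmap, lemA]
  rfl
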